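-- pv_equiv track=rewrite | github.com/tanghaibao/jcvi | utils/range.py | range_union
-- ===== SOURCE A (Python) =====
-- def range_union(ranges):
--     """
--     Returns total size of ranges, expect range as (chr, left, right)
--     >>> ranges = [("1", 30, 45), ("1", 40, 50), ("1", 10, 50)]
--     >>> range_union(ranges)
--     41
--     >>> ranges = [("1", 30, 45), ("2", 40, 50)]
--     >>> range_union(ranges)
--     27
--     >>> ranges = [("1", 30, 45), ("1", 45, 50)]
--     >>> range_union(ranges)
--     21
--     """
--     ranges.sort()
--
--     total_len = 0
--     cur_chr, cur_left, cur_right = ranges[0] # left-most range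
--     for r in ranges:
--         # open a new range if left > cur_right or chr != cur_chr
--         if r[1] > cur_right or r[0] != cur_chr:
--             total_len += cur_right - cur_left + 1
--             cur_chr, cur_left, cur_right = r
--         else:
--             # update cur_right
--             cur_right = max(r[2], cur_right)
--
--     # the last one
--     total_len += cur_right - cur_left + 1
--
--     return total_len
-- ===== SOURCE B (Python) =====
-- def range_union(ranges):
--     # Same in-place sort side effect as the original.
--     ranges.sort()
--     by_chr = {}
--     for c, left, right in ranges:
--         by_chr.setdefault(c, []).append((left, right))
--     total = 0
--     for group in by_chr.values():
--         total += _merged_size(group)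
--     return total
--
--
-- def _merged_size(group):
--     """Union size of the (already sorted) intervals of one chromosome."""
--     total = 0
--     cur_left, cur_right = group[0]
--     for left, right in group[1:]:
--         if left > cur_right:
--             total += cur_right - cur_left + 1
--             cur_left, cur_right = left, right
--         else:
--             cur_right = max(right, cur_right)
--     return total + cur_right - cur_left + 1
-- ===== Notes on version B (the rewrite author's own statement) =====
-- stated objective: alternative
-- what changed: Replaces A's single flat sweep (which threads the current chromosome through the merge state and re-processes the first sorted element it used as seed) by a dict grouping the sorted ranges per chromosome followed by a chromosome-free interval merge per group, summing the per-chromosome union sizes; Pre_ excludes the empty list (A raises IndexError) and lists whose lexicographically smallest tuple has left > right (not a genuine range; A counts that seed block twice, B once).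
-- outside the precondition, e.g. on range_union([('1', 5, 2)]): A returns -4, B returns -2
import Mathlib
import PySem

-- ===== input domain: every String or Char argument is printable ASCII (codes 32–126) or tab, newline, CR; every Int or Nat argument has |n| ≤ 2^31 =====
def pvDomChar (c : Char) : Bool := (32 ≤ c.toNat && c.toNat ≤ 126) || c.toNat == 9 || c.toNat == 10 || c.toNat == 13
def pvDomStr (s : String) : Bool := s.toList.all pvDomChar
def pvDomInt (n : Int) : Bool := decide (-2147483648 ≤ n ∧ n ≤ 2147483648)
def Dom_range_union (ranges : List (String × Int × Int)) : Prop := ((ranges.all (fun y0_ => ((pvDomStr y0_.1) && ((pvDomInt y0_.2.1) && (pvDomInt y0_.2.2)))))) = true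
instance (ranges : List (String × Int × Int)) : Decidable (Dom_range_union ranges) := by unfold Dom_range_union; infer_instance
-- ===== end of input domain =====

-- B replaces A's flat chromosome-aware sweep by a per-chromosome grouping table plus a
-- chromosome-free merge per group (objective: alternative decomposition, same cost).
-- Both A and B sort the argument list in place in Python; the equivalence proved here is
-- about the return value (the two side effects are identical anyway).

-- Python's list.sort() on (str, int, int) tuples: stable insertion with the
-- lexicographic strict order (shared by both ports; PySem.List.sorted has exactly
-- this foldl/insertBy shape, cf. PySem.List.sorted_eq_foldl_insertBy).
def tupLt (a b : String × Int × Int) : Bool :=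
  decide (a.1.toList < b.1.toList) ||
    (a.1 == b.1 && (decide (a.2.1 < b.2.1) || (a.2.1 == b.2.1 && decide (a.2.2 < b.2.2))))

def pySort3 (xs : List (String × Int × Int)) : List (String × Int × Int) :=
  xs.foldl (fun acc x => PySem.List.insertBy tupLt x acc) []

-- ===== PORT A =====
def sweepStep (acc : Int × String × Int × Int) (r : String × Int × Int) :
    Int × String × Int × Int :=
  if r.2.1 > acc.2.2.2 ∨ r.1 ≠ acc.2.1 then
    (acc.1 + acc.2.2.2 - acc.2.2.1 + 1, r)
  else
    (acc.1, acc.2.1, acc.2.2.1, max r.2.2 acc.2.2.2)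

def range_union (ranges : List (String × Int × Int)) : Int :=
  let s := pySort3 ranges
  match s with
  | [] => 0          -- Python raises IndexError on ranges[0] here; excluded by Pre_
  | r0 :: _ =>
    let st := s.foldl sweepStep (0, r0)     -- the loop runs over the WHOLE sorted list
    st.1 + st.2.2.2 - st.2.2.1 + 1

-- ===== PORT B =====
def mergeStep (acc : Int × Int × Int) (p : Int × Int) : Int × Int × Int :=
  if p.1 > acc.2.2 then (acc.1 + acc.2.2 - acc.2.1 + 1, p.1, p.2)
  else (acc.1, acc.2.1, max p.2 acc.2.2)

def mergedSize (g : List (Int × Int)) : Int :=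
  match g with
  | [] => 0          -- unreachable: every group holds at least one interval
  | p :: rest =>
    let st := rest.foldl mergeStep (0, p.1, p.2)
    st.1 + st.2.2 - st.2.1 + 1

def range_union_alt (ranges : List (String × Int × Int)) : Int :=
  let s := pySort3 ranges
  let byChr := s.foldl (fun d r => d.modify r.1 [] (fun g => g ++ [r.2]))
    (PySem.Dict.empty : PySem.Dict String (List (Int × Int)))
  byChr.values.foldl (fun total g => total + mergedSize g) 0

-- ===== PRECONDITION & SPEC =====
-- Pre_ excludes the empty list (A raises IndexError) and lists whose lexicographically
-- smallest tuple has left > right: such a tuple denotes no genuine interval, and there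
-- A's sweep counts the seed block twice while B counts every group once, so both totals
-- are meaningless negative artefacts and differ.
def Pre_range_union (ranges : List (String × Int × Int)) : Prop :=
  ranges ≠ [] ∧ ∃ m ∈ ranges, (∀ x ∈ ranges, tupLt x m = false) ∧ m.2.1 ≤ m.2.2
instance (ranges : List (String × Int × Int)) : Decidable (Pre_range_union ranges) := by
  unfold Pre_range_union; infer_instance

def pvWitness_range_union : (List (String × Int × Int)) := [("1", 30, 45), ("1", 40, 50), ("2", 10, 20)]

def Spec_range_union (ranges : List (String × Int × Int)) (out : Int) : Prop := out = range_union_alt ranges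
instance (ranges : List (String × Int × Int)) (out : Int) : Decidable (Spec_range_union ranges out) := by unfold Spec_range_union; infer_instance

-- ===== CLAIM (what is proved, stated in full; the proofs are below) =====
def Claim_equal_range_union : Prop := ∀ (ranges : List (String × Int × Int)), Dom_range_union ranges → Pre_range_union ranges → Spec_range_union ranges (range_union ranges)

-- ===== LEMMAS AND PROOFS =====

-- ---- the lexicographic comparator ----
lemma tupLt_irrefl (a : String × Int × Int) : tupLt a a = false := by
  simp [tupLt]

lemma tupLt_trans {a b c : String × Int × Int} (h1 : tupLt a b = true)
    (h2 : tupLt b c = true) : tupLt a c = true := by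
  simp only [tupLt, Bool.or_eq_true, Bool.and_eq_true, decide_eq_true_eq, beq_iff_eq,
    ← String.lt_iff_toList_lt] at *
  rcases h1 with h1 | ⟨e1, h1⟩ <;> rcases h2 with h2 | ⟨e2, h2⟩
  · exact Or.inl (lt_trans h1 h2)
  · exact Or.inl (lt_of_lt_of_eq h1 e2)
  · exact Or.inl (lt_of_eq_of_lt e1 h2)
  · refine Or.inr ⟨e1.trans e2, ?_⟩
    rcases h1 with h1 | ⟨f1, h1⟩ <;> rcases h2 with h2 | ⟨f2, h2⟩
    · exact Or.inl (lt_trans h1 h2)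
    · exact Or.inl (lt_of_lt_of_eq h1 f2)
    · exact Or.inl (lt_of_eq_of_lt f1 h2)
    · exact Or.inr ⟨f1.trans f2, lt_trans h1 h2⟩

lemma tupLt_asymm {a b : String × Int × Int} (h : tupLt a b = true) : tupLt b a = false := by
  by_contra hb
  have hba : tupLt b a = true := by revert hb; cases hba : tupLt b a <;> simp
  have := tupLt_trans h hba
  rw [tupLt_irrefl] at this; exact absurd this (by simp)

lemma tupLt_total {a b : String × Int × Int} (h1 : tupLt a b = false)
    (h2 : tupLt b a = false) : a = b := by
  simp only [tupLt, Bool.or_eq_false_iff, Bool.and_eq_false_iff, decide_eq_false_iff_not,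
    beq_eq_false_iff_ne, ne_eq, ← String.lt_iff_toList_lt] at h1 h2
  obtain ⟨hs1, hrest1⟩ := h1
  obtain ⟨hs2, hrest2⟩ := h2
  have hs : a.1 = b.1 := le_antisymm (not_lt.mp hs2) (not_lt.mp hs1)
  rcases hrest1 with h | hrest1; · exact absurd hs h
  rcases hrest2 with h | hrest2; · exact absurd hs.symm h
  obtain ⟨hl1, hrr1⟩ := hrest1
  obtain ⟨hl2, hrr2⟩ := hrest2
  have hl : a.2.1 = b.2.1 := le_antisymm (not_lt.mp hl2) (not_lt.mp hl1)
  rcases hrr1 with h | hr1; · exact absurd hl h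
  rcases hrr2 with h | hr2; · exact absurd hl.symm h
  have hr : a.2.2 = b.2.2 := le_antisymm (not_lt.mp hr2) (not_lt.mp hr1)
  exact Prod.ext hs (Prod.ext hl hr)

lemma tupLt_false_fst_le {a b : String × Int × Int} (h : tupLt b a = false) : a.1 ≤ b.1 := by
  simp only [tupLt, Bool.or_eq_false_iff, decide_eq_false_iff_not,
    ← String.lt_iff_toList_lt] at h
  exact not_lt.mp h.1

-- ---- the sort: permutation, pairwise order, minimal head ----
lemma insertBy_perm (x : String × Int × Int) (ys : List (String × Int × Int)) :
    (PySem.List.insertBy tupLt x ys).Perm (x :: ys) := by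
  induction ys with
  | nil => simp [PySem.List.insertBy]
  | cons y t ih =>
    simp only [PySem.List.insertBy]
    split
    · exact List.Perm.refl _
    · exact (List.Perm.cons y ih).trans (List.Perm.swap x y t)

lemma pySort3_perm (xs : List (String × Int × Int)) : (pySort3 xs).Perm xs := by
  suffices h : ∀ acc : List (String × Int × Int),
      (xs.foldl (fun acc x => PySem.List.insertBy tupLt x acc) acc).Perm (acc ++ xs) by
    simpa [pySort3] using h []
  induction xs with
  | nil => intro acc; simp
  | cons x t ih =>
    intro acc
    simp only [List.foldl_cons]
    refine (ih _).trans ?_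
    have h1 : (PySem.List.insertBy tupLt x acc ++ t).Perm ((x :: acc) ++ t) :=
      (insertBy_perm x acc).append_right t
    refine h1.trans ?_
    show (x :: (acc ++ t)).Perm (acc ++ x :: t)
    exact List.perm_middle.symm

lemma insertBy_pairwise (x : String × Int × Int) (ys : List (String × Int × Int))
    (h : ys.Pairwise (fun a b => tupLt b a = false)) :
    (PySem.List.insertBy tupLt x ys).Pairwise (fun a b => tupLt b a = false) := by
  induction ys with
  | nil => simp [PySem.List.insertBy]
  | cons y t ih =>
    rcases List.pairwise_cons.mp h with ⟨hy, ht⟩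
    simp only [PySem.List.insertBy]
    split
    · rename_i hlt
      refine List.pairwise_cons.mpr ⟨?_, h⟩
      intro z hz
      rcases hz with _ | hz
      · exact tupLt_asymm hlt
      · -- z ∈ t, tupLt x y, tupLt y z = false: if tupLt z x then tupLt z y, contra hy
        rename_i hzt
        by_contra hzx
        have hzx' : tupLt z x = true := by revert hzx; cases hc : tupLt z x <;> simp
        have hzy := tupLt_trans hzx' hlt
        have := hy z hzt
        rw [this] at hzy; exact absurd hzy (by simp)
    · rename_i hnlt
      refine List.pairwise_cons.mpr ⟨?_, ih ht⟩
      intro z hz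
      rcases (PySem.List.mem_insertBy tupLt x z t).mp hz with hz | hz
      · subst hz; revert hnlt; cases hc : tupLt z y <;> simp
      · exact hy z hz

lemma pySort3_pairwise (xs : List (String × Int × Int)) :
    (pySort3 xs).Pairwise (fun a b => tupLt b a = false) := by
  suffices h : ∀ acc : List (String × Int × Int),
      acc.Pairwise (fun a b => tupLt b a = false) →
      (xs.foldl (fun acc x => PySem.List.insertBy tupLt x acc) acc).Pairwise
        (fun a b => tupLt b a = false) by
    exact h [] (by simp)
  induction xs with
  | nil => intro acc hacc; simpa using hacc
  | cons x t ih =>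
    intro acc hacc
    simp only [List.foldl_cons]
    exact ih _ (insertBy_pairwise x acc hacc)

-- ---- proof-side accounting ----
def keyGroup (c : String) (s : List (String × Int × Int)) : List (Int × Int) :=
  (s.filter (fun r => r.1 == c)).map (fun r => r.2)

def contFold (t cl cr : Int) (ps : List (Int × Int)) : Int :=
  let st := ps.foldl mergeStep (t, cl, cr)
  st.1 + st.2.2 - st.2.1 + 1

def gsum (ks : List String) (s : List (String × Int × Int)) : Int :=
  (ks.map (fun c => mergedSize (keyGroup c s))).sum

lemma contFold_add (ps : List (Int × Int)) :
    ∀ t cl cr : Int, contFold t cl cr ps = t + contFold 0 cl cr ps := by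
  induction ps with
  | nil => intro t cl cr; simp [contFold]; ring
  | cons p rest ih =>
    intro t cl cr
    simp only [contFold, List.foldl_cons] at *
    by_cases hp : p.1 > cr
    · simp only [mergeStep, if_pos hp]
      rw [ih (t + cr - cl + 1), ih (0 + cr - cl + 1)]; ring
    · simp only [mergeStep, if_neg hp]
      rw [ih t, ih 0]

lemma contFold_cons_gt {cl cr : Int} (p : Int × Int) (ps : List (Int × Int))
    (h : p.1 > cr) :
    contFold 0 cl cr (p :: ps) = (cr - cl + 1) + contFold 0 p.1 p.2 ps := by
  have h0 : contFold 0 cl cr (p :: ps) = contFold (0 + cr - cl + 1) p.1 p.2 ps := by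
    simp only [contFold, List.foldl_cons, mergeStep, if_pos h]
  rw [h0, contFold_add]; ring

lemma contFold_cons_le {cl cr : Int} (p : Int × Int) (ps : List (Int × Int))
    (h : ¬ p.1 > cr) :
    contFold 0 cl cr (p :: ps) = contFold 0 cl (max p.2 cr) ps := by
  simp only [contFold, List.foldl_cons, mergeStep, if_neg h]

lemma gsum_congr {ks : List String} {s1 s2 : List (String × Int × Int)}
    (h : ∀ c ∈ ks, keyGroup c s1 = keyGroup c s2) : gsum ks s1 = gsum ks s2 := by
  unfold gsum
  congr 1
  exact List.map_congr_left (fun c hc => by rw [h c hc])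

lemma foldl_add_map {α : Type} (l : List α) (f : α → Int) (a : Int) :
    l.foldl (fun t x => t + f x) a = a + (l.map f).sum := by
  induction l generalizing a with
  | nil => simp
  | cons x t ih => simp [ih]; ring

-- ---- PySem.Set.ofList, one cons step ----
lemma foldl_add_cons {α : Type} [BEq α] [LawfulBEq α] (xs : List α) (x : α) :
    ∀ s : List α, List.foldl PySem.Set.add (x :: s) xs =
      x :: List.foldl PySem.Set.add s (xs.filter (fun y => !(y == x))) := by
  induction xs with
  | nil => intro s; simp
  | cons y t ih =>
    intro s
    simp only [List.foldl_cons, List.filter_cons]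
    by_cases hxy : (y == x) = true
    · have hyx : y = x := by simpa using hxy
      subst hyx
      have h1 : PySem.Set.add (y :: s) y = y :: s := by
        simp [PySem.Set.add]
      rw [h1]
      simpa [hxy] using ih s
    · have hny : y ≠ x := by simpa using hxy
      simp only [hxy, Bool.not_false, if_pos, List.foldl_cons]
      by_cases hm : y ∈ s
      · have h1 : PySem.Set.add (x :: s) y = x :: s := by
          simp [PySem.Set.add, hm]
        have h2 : PySem.Set.add s y = s := by simp [PySem.Set.add, hm]
        rw [h1, h2, ih s]
      · have hm' : y ∉ x :: s := by
          intro hmem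
          rcases List.mem_cons.mp hmem with h | h
          · exact hny h
          · exact hm h
        have h1 : PySem.Set.add (x :: s) y = x :: (s ++ [y]) := by
          simp [PySem.Set.add, hm']
        have h2 : PySem.Set.add s y = s ++ [y] := by simp [PySem.Set.add, hm]
        rw [h1, h2, ih (s ++ [y])]

lemma ofList_cons {α : Type} [BEq α] [LawfulBEq α] (x : α) (xs : List α) :
    PySem.Set.ofList (x :: xs) = x :: PySem.Set.ofList (xs.filter (fun y => !(y == x))) := by
  unfold PySem.Set.ofList
  simp only [List.foldl_cons]
  have h1 : PySem.Set.add PySem.Set.empty x = [x] := by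
    simp [PySem.Set.add, PySem.Set.empty]
  rw [h1]
  exact foldl_add_cons xs x []

lemma gsum_cons (c : String) (ks : List String) (s : List (String × Int × Int)) :
    gsum (c :: ks) s = mergedSize (keyGroup c s) + gsum ks s := by
  simp [gsum]

lemma keyGroup_cons_self (r : String × Int × Int) (s : List (String × Int × Int)) :
    keyGroup r.1 (r :: s) = r.2 :: keyGroup r.1 s := by
  simp [keyGroup]

lemma mergedSize_cons (p : Int × Int) (g : List (Int × Int)) :
    mergedSize (p :: g) = contFold 0 p.1 p.2 g := rfl

lemma keyGroup_cons_of_ne {k : String} (r : String × Int × Int)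
    (s : List (String × Int × Int)) (h : r.1 ≠ k) : keyGroup k (r :: s) = keyGroup k s := by
  simp [keyGroup, h]

lemma mem_ofList_filter_ne {k c : String} {ks : List String}
    (h : k ∈ PySem.Set.ofList (ks.filter (fun y => !(y == c)))) : k ≠ c := by
  have := (PySem.Set.mem_ofList _ _).mp h
  have := (List.mem_filter.mp this).2
  simpa using this

-- A's sweep over a chromosome-sorted list equals the per-chromosome accounting
lemma sweep_eq : ∀ (s : List (String × Int × Int)),
    s.Pairwise (fun a b => a.1 ≤ b.1) →
    ∀ (c : String) (cl cr t : Int), (∀ y ∈ s, c ≤ y.1) →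
      ((s.foldl sweepStep (t, c, cl, cr)).1 + (s.foldl sweepStep (t, c, cl, cr)).2.2.2
          - (s.foldl sweepStep (t, c, cl, cr)).2.2.1 + 1) =
        t + contFold 0 cl cr (keyGroup c s) +
          gsum (PySem.Set.ofList ((s.map (fun r => r.1)).filter (fun k => !(k == c)))) s := by
  intro s
  induction s with
  | nil =>
    intro _ c cl cr t _
    simp [contFold, keyGroup, gsum, PySem.Set.ofList, PySem.Set.empty]
    ring
  | cons r s' ih =>
    intro hpw c cl cr t hc
    obtain ⟨hr, hpw'⟩ := List.pairwise_cons.mp hpw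
    rw [List.foldl_cons]
    by_cases hrc : r.1 = c
    · subst hrc
      have hkeys : ((r :: s').map (fun r => r.1)).filter (fun k => !(k == r.1)) =
          (s'.map (fun r => r.1)).filter (fun k => !(k == r.1)) := by
        simp
      have hgc : gsum (PySem.Set.ofList ((s'.map (fun r => r.1)).filter
            (fun k => !(k == r.1)))) (r :: s') =
          gsum (PySem.Set.ofList ((s'.map (fun r => r.1)).filter
            (fun k => !(k == r.1)))) s' :=
        gsum_congr (fun k hk =>
          keyGroup_cons_of_ne r s' (Ne.symm (mem_ofList_filter_ne hk)))
      have hcs : ∀ y ∈ s', r.1 ≤ y.1 := fun y hy => hc y (List.mem_cons_of_mem _ hy)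
      by_cases hgt : r.2.1 > cr
      · have hstep : sweepStep (t, r.1, cl, cr) r = (t + cr - cl + 1, r.1, r.2.1, r.2.2) := by
          unfold sweepStep; rw [if_pos (Or.inl hgt)]
        rw [hstep, ih hpw' r.1 r.2.1 r.2.2 (t + cr - cl + 1) hcs,
          hkeys, hgc, keyGroup_cons_self, contFold_cons_gt _ _ hgt]
        ring
      · have hstep : sweepStep (t, r.1, cl, cr) r = (t, r.1, cl, max r.2.2 cr) := by
          unfold sweepStep; rw [if_neg (by simpa using hgt)]
        rw [hstep, ih hpw' r.1 cl (max r.2.2 cr) t hcs,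
          hkeys, hgc, keyGroup_cons_self, contFold_cons_le _ _ hgt]
    · have hcr : c < r.1 := lt_of_le_of_ne (hc r List.mem_cons_self) (fun h => hrc h.symm)
      have hs'ne : ∀ y ∈ s', y.1 ≠ c := fun y hy =>
        ne_of_gt (lt_of_lt_of_le hcr (hr y hy))
      have hkg0 : keyGroup c (r :: s') = [] := by
        have : List.filter (fun x => x.1 == c) (r :: s') = [] := by
          refine List.filter_eq_nil_iff.mpr ?_
          intro a ha
          rcases List.mem_cons.mp ha with h | h
          · subst h; simp [hrc]
          · simp [hs'ne a h]
        simp [keyGroup, this]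
      have hkeys : ((r :: s').map (fun r => r.1)).filter (fun k => !(k == c)) =
          r.1 :: s'.map (fun r => r.1) := by
        simp only [List.map_cons, List.filter_cons]
        rw [if_pos (by simpa using hrc)]
        congr 1
        refine List.filter_eq_self.mpr ?_
        intro k hk
        obtain ⟨y, hy, rfl⟩ := List.mem_map.mp hk
        simpa using hs'ne y hy
      have hstep : sweepStep (t, c, cl, cr) r = (t + cr - cl + 1, r.1, r.2.1, r.2.2) := by
        unfold sweepStep; rw [if_pos (Or.inr hrc)]
      have hgc : gsum (PySem.Set.ofList ((s'.map (fun r => r.1)).filter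
            (fun y => !(y == r.1)))) (r :: s') =
          gsum (PySem.Set.ofList ((s'.map (fun r => r.1)).filter
            (fun y => !(y == r.1)))) s' :=
        gsum_congr (fun k hk =>
          keyGroup_cons_of_ne r s' (Ne.symm (mem_ofList_filter_ne hk)))
      rw [hstep, ih hpw' r.1 r.2.1 r.2.2 (t + cr - cl + 1) hr,
        hkg0, hkeys, ofList_cons, gsum_cons, keyGroup_cons_self, mergedSize_cons, hgc]
      simp only [contFold, List.foldl_nil]
      ring

-- B's dict of groups, unfolded
lemma alt_eq_gsum (ranges : List (String × Int × Int)) :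
    range_union_alt ranges =
      gsum (PySem.Set.ofList ((pySort3 ranges).map (fun r => r.1))) (pySort3 ranges) := by
  unfold range_union_alt
  dsimp only
  have hk : (List.foldl (fun d r => PySem.Dict.modify d r.1 [] fun g => g ++ [r.2])
        (PySem.Dict.empty : PySem.Dict String (List (Int × Int))) (pySort3 ranges)).keys =
      PySem.Set.ofList ((pySort3 ranges).map (fun r => r.1)) := by
    rw [PySem.Dict.keys_foldl_modify_key (pySort3 ranges) (fun r => r.1) []
      (fun _ r g => g ++ [r.2]) PySem.Dict.empty]
    rw [PySem.Set.update_eq_append_filter]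
    simp [PySem.Dict.empty]
  have hnd : (List.foldl (fun d r => PySem.Dict.modify d r.1 [] fun g => g ++ [r.2])
        (PySem.Dict.empty : PySem.Dict String (List (Int × Int))) (pySort3 ranges)).keys.Nodup := by
    rw [hk]; exact PySem.Set.nodup_ofList _
  rw [PySem.Dict.values_eq_map_keys _ hnd [], hk, List.foldl_map, foldl_add_map]
  have hg : ∀ c : String,
      (List.foldl (fun d r => PySem.Dict.modify d r.1 [] fun g => g ++ [r.2])
        (PySem.Dict.empty : PySem.Dict String (List (Int × Int))) (pySort3 ranges)).getD c [] =
      keyGroup c (pySort3 ranges) := by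
    intro c
    rw [PySem.Dict.getD_foldl_modify_append]
    simp [keyGroup, PySem.Dict.empty, PySem.Dict.getD, PySem.Dict.get?]
  simp only [hg, gsum, zero_add]

-- ===== VERDICT (by name: the statement is the Claim_ definition above) =====
theorem range_union_spec : Claim_equal_range_union := by
  intro ranges _ hpre
  obtain ⟨hne, m0, hm0mem, hmin, hlr⟩ := hpre
  unfold Spec_range_union
  have hperm := pySort3_perm ranges
  have hpw := pySort3_pairwise ranges
  rw [alt_eq_gsum]
  cases hs : pySort3 ranges with
  | nil =>
    rw [hs] at hperm
    exact absurd (hperm.symm.eq_nil) hne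
  | cons m t' =>
    rw [hs] at hperm hpw
    obtain ⟨hhead, hpw'⟩ := List.pairwise_cons.mp hpw
    have hm_mem : m ∈ ranges := hperm.mem_iff.mp List.mem_cons_self
    have h1 : tupLt m m0 = false := hmin m hm_mem
    have h2 : tupLt m0 m = false := by
      have hm0' : m0 ∈ m :: t' := hperm.mem_iff.mpr hm0mem
      rcases List.mem_cons.mp hm0' with h | h
      · subst h; exact tupLt_irrefl m0
      · exact hhead m0 h
    have hmm : m = m0 := tupLt_total h1 h2
    have hlr' : m.2.1 ≤ m.2.2 := by rw [hmm]; exact hlr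
    unfold range_union
    rw [hs]
    simp only [List.foldl_cons]
    have hstep : sweepStep (0, m) m = (0, m.1, m.2.1, m.2.2) := by
      unfold sweepStep
      rw [if_neg (by simp [not_lt.mpr hlr'])]
      simp
    rw [hstep]
    have hfst : t'.Pairwise (fun a b => a.1 ≤ b.1) :=
      hpw'.imp (fun h => tupLt_false_fst_le h)
    have hmle : ∀ y ∈ t', m.1 ≤ y.1 := fun y hy => tupLt_false_fst_le (hhead y hy)
    rw [sweep_eq t' hfst m.1 m.2.1 m.2.2 0 hmle]
    -- B side
    have hgc : gsum (PySem.Set.ofList ((t'.map (fun r => r.1)).filter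
          (fun y => !(y == m.1)))) (m :: t') =
        gsum (PySem.Set.ofList ((t'.map (fun r => r.1)).filter
          (fun y => !(y == m.1)))) t' :=
      gsum_congr (fun k hk =>
        keyGroup_cons_of_ne m t' (Ne.symm (mem_ofList_filter_ne hk)))
    rw [List.map_cons, ofList_cons, gsum_cons, keyGroup_cons_self, mergedSize_cons, hgc]
    ring
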